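-- pv_equiv track=rewrite | github.com/monishjocata/Vendor_Check | performance_issues.py | process_large_list_slow
-- ===== SOURCE A (Python) =====
-- from typing import List, Dict
--
-- def process_large_list_slow(data: List[int]) -> List[int]:
--     """Multiple passes through large list"""
--     # Multiple separate loops instead of single pass
--     evens = []
--     for item in data:
--         if item % 2 == 0:
--             evens.append(item)
--
--     squared = []
--     for item in evens:
--         squared.append(item ** 2)
--
--     filtered = []
--     for item in squared:
--         if item > 100:
--             filtered.append(item)
--
--     return filtered
-- ===== SOURCE B (Python) =====
-- from typing import List
--
-- def process_large_list_slow(data: List[int]) -> List[int]: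
--     """Single pass: square once, test both conditions together."""
--     return [x * x for x in data if x % 2 == 0 and x * x > 100]
-- ===== Notes on version B (the rewrite author's own statement) =====
-- stated objective: simpler
-- what changed: Replaced three sequential list-building loops (filter evens, square, filter >100) with one single-pass comprehension that squares each item once and tests both conditions together, building no intermediate lists.
import Mathlib
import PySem

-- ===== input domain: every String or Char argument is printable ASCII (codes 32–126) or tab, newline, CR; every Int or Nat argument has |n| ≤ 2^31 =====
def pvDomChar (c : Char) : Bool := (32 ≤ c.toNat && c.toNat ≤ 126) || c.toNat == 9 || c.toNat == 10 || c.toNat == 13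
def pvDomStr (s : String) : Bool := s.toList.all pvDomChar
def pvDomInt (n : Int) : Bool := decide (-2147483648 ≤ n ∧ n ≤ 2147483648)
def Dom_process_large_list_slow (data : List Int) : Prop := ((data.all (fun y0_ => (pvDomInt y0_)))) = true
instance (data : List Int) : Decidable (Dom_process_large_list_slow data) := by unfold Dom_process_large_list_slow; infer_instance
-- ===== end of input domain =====

-- B fuses A's three sequential list-building loops into one single-pass comprehension (simpler; same O(n) cost).


-- ===== PORT A =====
-- port of A: three separate accumulator loops building evens, squared, filtered
def process_large_list_slow (data : List Int) : List Int :=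
  let evens := data.foldl (fun acc item => if item % 2 = 0 then acc ++ [item] else acc) []
  let squared := evens.foldl (fun acc item => acc ++ [item ^ 2]) []
  let filtered := squared.foldl (fun acc item => if item > 100 then acc ++ [item] else acc) []
  filtered

-- ===== PORT B =====
-- port of B: one comprehension, square once, both tests together
def process_large_list_slow_alt (data : List Int) : List Int :=
  data.foldr (fun x acc => if x % 2 = 0 ∧ x * x > 100 then x * x :: acc else acc) []

-- ===== PRECONDITION & SPEC =====
def Spec_process_large_list_slow (data : List Int) (out : List Int) : Prop := out = process_large_list_slow_alt data
instance (data : List Int) (out : List Int) : Decidable (Spec_process_large_list_slow data out) := by unfold Spec_process_large_list_slow; infer_instance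

-- ===== CLAIM (what is proved, stated in full; the proofs are below) =====
def Claim_equal_process_large_list_slow : Prop := ∀ (data : List Int), Dom_process_large_list_slow data → Spec_process_large_list_slow data (process_large_list_slow data)

-- ===== LEMMAS AND PROOFS =====

-- ===== VERDICT (by name: the statement is the Claim_ definition above) =====
theorem pv_foldl_filter (p : Int → Prop) [DecidablePred p] (l acc : List Int) :
    l.foldl (fun a x => if p x then a ++ [x] else a) acc = acc ++ l.filter (fun x => decide (p x)) := by
  induction l generalizing acc with
  | nil => simp
  | cons h t ih =>
    simp only [List.foldl, List.filter]
    by_cases hp : p h <;> simp [hp, ih]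

theorem pv_foldl_map (l acc : List Int) :
    l.foldl (fun a x => a ++ [x ^ 2]) acc = acc ++ l.map (fun x => x ^ 2) := by
  induction l generalizing acc with
  | nil => simp
  | cons h t ih => simp [List.foldl, ih]

theorem pv_fused (l : List Int) :
    ((l.filter (fun x => decide (x % 2 = 0))).map (fun x => x ^ 2)).filter (fun x => decide (x > 100)) =
      l.foldr (fun x acc => if x % 2 = 0 ∧ x * x > 100 then x * x :: acc else acc) [] := by
  induction l with
  | nil => rfl
  | cons h t ih =>
    rw [List.foldr_cons, List.filter_cons]
    by_cases h2 : h % 2 = 0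
    · rw [if_pos (by simpa using h2), List.map_cons, List.filter_cons]
      by_cases h100 : h * h > 100
      · rw [if_pos (by simpa [pow_two] using h100), if_pos ⟨h2, h100⟩, ih, pow_two]
      · rw [if_neg (by simpa [pow_two] using h100), if_neg (fun hc => h100 hc.2), ih]
    · rw [if_neg (by simpa using h2), if_neg (fun hc => h2 hc.1), ih]

theorem process_large_list_slow_spec : Claim_equal_process_large_list_slow := by
  intro data _
  unfold Spec_process_large_list_slow process_large_list_slow process_large_list_slow_alt
  simp only [pv_foldl_filter, pv_foldl_map, List.nil_append]
  exact pv_fused data
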